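-- pv_equiv track=rewrite | github.com/pypi-data/pypi-mirror-355 | packages/foldedleastsquares/foldedleastsquares-1.1.10-py3-none-any.whl/foldedleastsquares/gpu.py | compute_duration_partitions
-- ===== SOURCE A (Python) =====
-- def compute_duration_partitions(durations_len, max_duration_in_samples):
--     duration_tuples = [0]
--     durations_len_boundary = 0
--     block_size_threshold = 2**16 - 1
--     while durations_len_boundary < durations_len:
--         if durations_len_boundary + block_size_threshold // max_duration_in_samples < durations_len:
--             durations_len_boundary = durations_len_boundary + block_size_threshold // max_duration_in_samples
--         else:
--             durations_len_boundary = durations_len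
--         duration_tuples = duration_tuples + [durations_len_boundary]
--     return duration_tuples
-- ===== SOURCE B (Python) =====
-- def compute_duration_partitions(durations_len, max_duration_in_samples):
--     # Descend from the top: each boundary below x is the largest multiple of the
--     # block step strictly below x; build the list back-to-front, then reverse.
--     if durations_len <= 0:
--         return [0]
--     step = (2**16 - 1) // max_duration_in_samples
--     acc = []
--     x = durations_len
--     while x > 0:
--         acc.append(x)
--         x = (x - 1) // step * step
--     acc.append(0)
--     acc.reverse()
--     return acc
-- ===== Notes on version B (the rewrite author's own statement) =====
-- stated objective: alternative
-- what changed: replaces A's bottom-up while loop that re-concatenates the whole boundary list each iteration by a top-down descent from durations_len to the largest multiple of the block step below the current boundary, appending in O(1) and reversing once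
import Mathlib
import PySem

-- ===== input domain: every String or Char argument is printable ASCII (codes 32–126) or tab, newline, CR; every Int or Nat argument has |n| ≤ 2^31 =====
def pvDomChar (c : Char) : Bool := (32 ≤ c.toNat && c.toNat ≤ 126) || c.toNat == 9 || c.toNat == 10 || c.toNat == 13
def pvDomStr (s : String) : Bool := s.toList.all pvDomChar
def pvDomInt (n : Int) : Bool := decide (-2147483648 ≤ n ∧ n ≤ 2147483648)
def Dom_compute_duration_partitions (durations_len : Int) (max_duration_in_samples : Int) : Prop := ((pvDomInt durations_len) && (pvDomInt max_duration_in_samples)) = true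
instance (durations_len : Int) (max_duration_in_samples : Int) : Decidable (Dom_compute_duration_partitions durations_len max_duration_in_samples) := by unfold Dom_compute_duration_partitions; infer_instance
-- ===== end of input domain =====

-- B replaces A's bottom-up while-loop (which re-concatenates the whole list each iteration)
-- by a top-down descent: starting at durations_len it repeatedly jumps to the largest
-- multiple of the block step strictly below the current boundary, appending into a list
-- that is reversed once at the end.

-- ===== PORT A =====
-- Literal port of A's while loop; `fuel` only makes the recursion total (inside Pre_ the
-- loop terminates within the given fuel, outside Pre_ the Python loop diverges or raises).
def pvLoopA (fuel : Nat) (durations_len max_duration_in_samples : Int)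
    (boundary : Int) (acc : List Int) : List Int :=
  match fuel with
  | 0 => acc
  | fuel + 1 =>
    if boundary < durations_len then
      let b' :=
        if boundary + PySem.Int.floordiv 65535 max_duration_in_samples < durations_len then
          boundary + PySem.Int.floordiv 65535 max_duration_in_samples
        else durations_len
      pvLoopA fuel durations_len max_duration_in_samples b' (acc ++ [b'])
    else acc

def compute_duration_partitions (durations_len : Int) (max_duration_in_samples : Int) : List Int :=
  pvLoopA (durations_len.toNat + 1) durations_len max_duration_in_samples 0 [0]

-- ===== PORT B =====
-- Literal port of Source B's top-down while loop; `fuel` only makes it total (x strictly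
-- decreases inside Pre_; outside Pre_ the Python loop diverges or raises).
def pvLoopB (fuel : Nat) (step : Int) (x : Int) (acc : List Int) : List Int :=
  match fuel with
  | 0 => acc
  | fuel + 1 =>
    if 0 < x then
      pvLoopB fuel step (PySem.Int.floordiv (x - 1) step * step) (acc ++ [x])
    else acc

def compute_duration_partitions_alt (durations_len : Int) (max_duration_in_samples : Int) : List Int :=
  if durations_len ≤ 0 then [0]
  else
    let step := PySem.Int.floordiv 65535 max_duration_in_samples
    ((pvLoopB (durations_len.toNat + 1) step durations_len []) ++ [0]).reverse

-- ===== PRECONDITION & SPEC =====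
-- Pre_ is exactly where Python A returns: with durations_len > 0, A raises ZeroDivisionError
-- when max_duration_in_samples = 0 and loops forever when it is negative or > 65535 (step 0).
def Pre_compute_duration_partitions (durations_len : Int) (max_duration_in_samples : Int) : Prop :=
  durations_len ≤ 0 ∨ (1 ≤ max_duration_in_samples ∧ max_duration_in_samples ≤ 65535)
instance (durations_len : Int) (max_duration_in_samples : Int) : Decidable (Pre_compute_duration_partitions durations_len max_duration_in_samples) := by unfold Pre_compute_duration_partitions; infer_instance

def pvWitness_compute_duration_partitions : Int × Int := (10, 100)

def Spec_compute_duration_partitions (durations_len : Int) (max_duration_in_samples : Int) (out : List Int) : Prop := out = compute_duration_partitions_alt durations_len max_duration_in_samples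
instance (durations_len : Int) (max_duration_in_samples : Int) (out : List Int) : Decidable (Spec_compute_duration_partitions durations_len max_duration_in_samples out) := by unfold Spec_compute_duration_partitions; infer_instance

-- ===== CLAIM =====
def Claim_equal_compute_duration_partitions : Prop := ∀ (durations_len : Int) (max_duration_in_samples : Int), Dom_compute_duration_partitions durations_len max_duration_in_samples → Pre_compute_duration_partitions durations_len max_duration_in_samples → Spec_compute_duration_partitions durations_len max_duration_in_samples (compute_duration_partitions durations_len max_duration_in_samples)

-- ===== LEMMAS AND PROOFS =====

theorem pyRange_pos_eq_nil (a b s : Int) (hs : 0 < s) (h : b ≤ a) :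
    PySem.List.pyRange a b s = [] := by
  rw [PySem.List.pyRange_of_pos a b hs]
  simp [not_lt.2 h]

theorem pyRange_pos_cons (a b s : Int) (hs : 0 < s) (h : a < b) :
    PySem.List.pyRange a b s = a :: PySem.List.pyRange (a + s) b s := by
  rw [PySem.List.pyRange_of_pos a b hs, PySem.List.pyRange_of_pos (a + s) b hs]
  by_cases h2 : a + s < b
  · rw [if_pos h, if_pos h2]
    have hne : s ≠ 0 := by omega
    have hcount : ((b - a + s - 1) / s).toNat = ((b - (a + s) + s - 1) / s).toNat + 1 := by
      have heq : b - a + s - 1 = (b - (a + s) + s - 1) + 1 * s := by ring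
      rw [heq, Int.add_mul_ediv_right _ _ hne]
      have hnn : 0 ≤ b - (a + s) + s - 1 := by omega
      have := Int.ediv_nonneg hnn (le_of_lt hs)
      omega
    rw [hcount, List.range_succ_eq_map]
    simp only [List.map_cons, List.map_map]
    congr 1
    · push_cast; ring
    · exact List.map_congr_left (fun k _ => by simp only [Function.comp]; push_cast; ring)
  · rw [if_pos h, if_neg h2]
    have hdiv : (b - a + s - 1) / s = 1 := by
      have hfd : PySem.Int.floordiv (b - a + s - 1) s = 1 :=
        (PySem.Int.floordiv_eq_iff_of_pos hs).2 ⟨by omega, by omega⟩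
      rwa [PySem.Int.floordiv_eq_ediv_of_pos hs] at hfd
    simp [hdiv]

-- Splitting off the last boundary: for s < x the last element of range(s, x, s) is
-- ((x-1)//s)*s, the largest multiple of s strictly below x.
theorem pyRange_pos_snoc (s x : Int) (hs : 0 < s) (hx : s < x) :
    PySem.List.pyRange s x s =
      PySem.List.pyRange s ((x - 1) / s * s) s ++ [(x - 1) / s * s] := by
  rw [PySem.List.pyRange_of_pos s x hs, PySem.List.pyRange_of_pos s ((x - 1) / s * s) hs]
  set q := (x - 1) / s with hq
  have hq1 : 1 ≤ q := Int.le_ediv_of_mul_le hs (by omega)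
  have hn1 : (x - s + s - 1) / s = q := by rw [hq]; congr 1; omega
  rw [if_pos hx]
  by_cases h2 : s < q * s
  · rw [if_pos h2]
    have hn2 : (q * s - s + s - 1) / s = q - 1 := by
      have he : q * s - s + s - 1 = (s - 1) + (q - 1) * s := by ring
      rw [he, Int.add_mul_ediv_right _ _ (by omega : s ≠ 0),
        Int.ediv_eq_zero_of_lt (by omega) (by omega)]
      omega
    rw [hn1, hn2]
    have htn : q.toNat = (q - 1).toNat + 1 := by omega
    rw [htn, List.range_succ, List.map_append]
    congr 1
    simp only [List.map_cons, List.map_nil]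
    congr 1
    have hc : ((q - 1).toNat : Int) = q - 1 := by omega
    rw [hc]; ring
  · rw [if_neg h2]
    have hq1' : q = 1 := by nlinarith
    rw [hn1, hq1']
    simp

theorem pvLoopA_stop (fuel : Nat) (len max boundary : Int) (acc : List Int)
    (h : len ≤ boundary) : pvLoopA fuel len max boundary acc = acc := by
  cases fuel with
  | zero => rfl
  | succ n => simp [pvLoopA, not_lt.2 h]

theorem pvLoopB_stop (fuel : Nat) (step x : Int) (acc : List Int)
    (h : x ≤ 0) : pvLoopB fuel step x acc = acc := by
  cases fuel with
  | zero => rfl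
  | succ n => simp [pvLoopB, not_lt.2 h]

theorem pvLoopA_eq (fuel : Nat) (len max : Int)
    (hm : 1 ≤ max) (hM : max ≤ 65535) :
    ∀ (boundary : Int) (acc : List Int), boundary < len → (len - boundary).toNat < fuel →
    pvLoopA fuel len max boundary acc =
      acc ++ PySem.List.pyRange (boundary + PySem.Int.floordiv 65535 max) len
        (PySem.Int.floordiv 65535 max) ++ [len] := by
  have hm0 : (0 : Int) < max := by omega
  have hs : 0 < PySem.Int.floordiv 65535 max :=
    (PySem.Int.le_floordiv_iff_mul_le (a := 65535) (q := 1) hm0).2 (by omega)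
  induction fuel with
  | zero => intro boundary acc _ hf; omega
  | succ n ih =>
    intro boundary acc hb hf
    rw [pvLoopA, if_pos hb]
    set d := PySem.Int.floordiv 65535 max with hd
    by_cases h2 : boundary + d < len
    · rw [if_pos h2, ih (boundary + d) (acc ++ [boundary + d]) h2 (by omega),
        pyRange_pos_cons (boundary + d) len d hs h2]
      simp
    · rw [if_neg h2, pvLoopA_stop n len max len (acc ++ [len]) le_rfl,
        pyRange_pos_eq_nil (boundary + d) len d hs (by omega)]
      simp

theorem pvLoopB_eq (fuel : Nat) (step : Int) (hs : 0 < step) :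
    ∀ (x : Int) (acc : List Int), 0 < x → x.toNat < fuel →
    pvLoopB fuel step x acc =
      acc ++ (PySem.List.pyRange step x step ++ [x]).reverse := by
  induction fuel with
  | zero => intro x acc hx hf; omega
  | succ n ih =>
    intro x acc hx hf
    rw [pvLoopB, if_pos hx]
    have hfd : PySem.Int.floordiv (x - 1) step = (x - 1) / step :=
      PySem.Int.floordiv_eq_ediv_of_pos hs
    set p := (x - 1) / step * step with hp
    have hple : p ≤ x - 1 := by
      rw [hp]; exact Int.ediv_mul_le (x - 1) (by omega)
    have hp0 : 0 ≤ p := mul_nonneg (Int.ediv_nonneg (by omega) (le_of_lt hs)) (le_of_lt hs)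
    by_cases hpp : 0 < p
    · have hsx : step < x := by
        by_contra hcon
        have hz : (x - 1) / step = 0 := Int.ediv_eq_zero_of_lt (by omega) (by omega)
        rw [hp, hz] at hpp; simp at hpp
      rw [hfd, ← hp, ih p (acc ++ [x]) hpp (by omega),
        pyRange_pos_snoc step x hs hsx, ← hp]
      simp
    · have hpz : p = 0 := by omega
      have hxs : x ≤ step := by
        by_contra hcon
        have hq1 : 1 ≤ (x - 1) / step := Int.le_ediv_of_mul_le hs (by omega)
        nlinarith
      rw [hfd, ← hp, hpz, pvLoopB_stop n step 0 (acc ++ [x]) le_rfl,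
        pyRange_pos_eq_nil step x step hs hxs]
      simp

-- ===== VERDICT =====
theorem compute_duration_partitions_spec : Claim_equal_compute_duration_partitions := by
  intro len max _ hpre
  unfold Spec_compute_duration_partitions compute_duration_partitions compute_duration_partitions_alt
  by_cases hlen : len ≤ 0
  · rw [if_pos hlen, pvLoopA_stop _ len max 0 [0] hlen]
  · have hpos : 0 < len := by omega
    obtain ⟨hm, hM⟩ : 1 ≤ max ∧ max ≤ 65535 := by
      rcases hpre with h | h
      · omega
      · exact h
    have hm0 : (0 : Int) < max := by omega
    have hs : 0 < PySem.Int.floordiv 65535 max :=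
      (PySem.Int.le_floordiv_iff_mul_le (a := 65535) (q := 1) hm0).2 (by omega)
    rw [if_neg hlen]
    show _ = ((pvLoopB (len.toNat + 1) (PySem.Int.floordiv 65535 max) len []) ++ [0]).reverse
    rw [pvLoopA_eq (len.toNat + 1) len max hm hM 0 [0] hpos (by omega),
      pvLoopB_eq (len.toNat + 1) (PySem.Int.floordiv 65535 max) hs len [] hpos (by omega)]
    simp
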